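-- pv_equiv track=rewrite | github.com/TheRoomMapp/CoolKids | roomour_f2019.py | room_info
-- ===== SOURCE A (Python) =====
-- def all_considered_rooms(biglist):
--     '''
--     Gives a list of all rooms SFU offers classes at
--     '''
--     room_dict={}
--     lrooms=[]
--     for dic in biglist:
--         if 'buildingCode' in dic:
--             if dic['buildingCode'] not in room_dict:
--                 room_dict[dic['buildingCode']]=[]
--         if 'roomNumber' in dic:
--             if dic['roomNumber'] not in room_dict[dic['buildingCode']]:
--                 room_dict[dic['buildingCode']].append(dic['roomNumber'])
--
--     for key in room_dict:
--         for room in room_dict[key]: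
--             lrooms.append(key+" "+room)
--     return lrooms
--
-- def bookings_by_day(two_letter_weekday, biglist):
--     '''
--     Based on your choice of day, shows what rooms are occupied by half-hour time slots
--     '''
--     lstarttimes=['8:30', '9:00', '9:30', '10:00', '10:30', '11:00', '11:30', '12:00', '12:30', '13:00', '13:30', '14:00',
--             '14:30', '15:00', '15:30', '16:00', '16:30', '17:00', '17:30', '18:00', '18:30', '19:00', '19:30', '20:00', '20:30']
--     lendtimes=['8:20', '8:50', '9:20', '9:50', '10:20', '10:50', '11:20', '11:50', '12:20', '12:50', '13:20', '13:50', '14:20',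
--                '14:50', '15:20', '15:50', '16:20', '16:50', '17:20', '17:50', '18:20', '18:50', '19:20', '19:50', '20:20']
--     dfull_by_time={'8:30':[], '9:00': [], '9:30': [], '10:00': [], '10:30': [], '11:00': [], '11:30': [], '12:00': [],
--                    '12:30': [], '13:00': [], '13:30': [], '14:00': [], '14:30': [], '15:00': [], '15:30': [], '16:00': [],
--                    '16:30': [], '17:00': [], '17:30': [], '18:00': [], '18:30': [], '19:00': [], '19:30': [], '20:00': [], '20:30': []}
--     for dic in biglist:
--         if 'buildingCode' in dic:
--             if two_letter_weekday in dic['days']: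
--                 startfound="nah"
--                 endfound="nope"
--                 check=0
--                 startTimeThere = "yes"
--                 while startfound=="nah" and check<len(lstarttimes) and startTimeThere == "yes":
--                     if 'startTime' in dic:
--                     #seems like it's not there for at least one case
--                         if dic['startTime']==lstarttimes[check]:
--                             startfound=lstarttimes[check]
--                         else: check+=1
--                     else:
--                         startTimeThere = "no"
--                 checkend=0
--                 endTimeThere = "yes"
--                 while endfound=="nope" and checkend<len(lendtimes) and endTimeThere == "yes":
--                     if 'endTime' in dic:
--                         if dic['endTime']==lendtimes[checkend]:
--                             endfound=lendtimes[checkend]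
--                             for index in range(check, checkend):
--                                 dfull_by_time[lstarttimes[index]].append(dic['buildingCode']+" "+dic['roomNumber'])
--                     else:
--                         endTimeThere = "no"
--                     checkend+=1
--     return dfull_by_time
--
-- def empty_by_day(two_letter_weekday, biglist):
--     #The information we want!!!
--     '''
--     Based on your choice of day, shows which rooms are free by half-hour timeslots
--     Builds on previous functions
--     Grouped by building code, but otherwise not organized yet
--     Need to separate by campus as well
--     '''
--     free_room_dict={'8:30':[], '9:00': [], '9:30': [], '10:00': [], '10:30': [], '11:00': [], '11:30': [], '12:00': [],
--                    '12:30': [], '13:00': [], '13:30': [], '14:00': [], '14:30': [], '15:00': [], '15:30': [], '16:00': [],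
--                    '16:30': [], '17:00': [], '17:30': [], '18:00': [], '18:30': [], '19:00': [], '19:30': [], '20:00': [], '20:30': []}
--     timelist=['8:30', '9:00', '9:30', '10:00', '10:30', '11:00', '11:30', '12:00', '12:30', '13:00', '13:30', '14:00',
--             '14:30', '15:00', '15:30', '16:00', '16:30', '17:00', '17:30', '18:00', '18:30', '19:00', '19:30', '20:00', '20:30']
--     dfull_by_time=bookings_by_day(two_letter_weekday, biglist)
--     lrooms=all_considered_rooms(biglist)
--     for room in lrooms:
--         for time in timelist:
--             if room not in dfull_by_time[time]:
--                 free_room_dict[time].append(room)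
--     return free_room_dict
--
-- def empty_by_time(two_letter_weekday, start_time, biglist):
--     day_room_dict = empty_by_day(two_letter_weekday, biglist)
--     if start_time in day_room_dict:
--         return day_room_dict[start_time]
--
-- def room_info(room, two_letter_weekday, biglist):
--
-- 	timelist = ['8:30', '9:00', '9:30', '10:00', '10:30', '11:00', '11:30', '12:00', '12:30', '13:00', '13:30', '14:00',
--             '14:30', '15:00', '15:30', '16:00', '16:30', '17:00', '17:30', '18:00', '18:30', '19:00', '19:30', '20:00', '20:30']
-- 	room_use_dict = {'8:30': 'in use', '9:00': 'in use', '9:30': 'in use', '10:00': 'in use', '10:30': 'in use', '11:00': 'in use', '11:30': 'in use', '12:00': 'in use',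
--                    '12:30': 'in use', '13:00': 'in use', '13:30': 'in use', '14:00': 'in use', '14:30': 'in use', '15:00': 'in use', '15:30': 'in use', '16:00': 'in use',
--                    '16:30': 'in use', '17:00': 'in use', '17:30': 'in use', '18:00': 'in use', '18:30': 'in use', '19:00': 'in use', '19:30': 'in use', '20:00': 'in use',                                 '20:30': 'in use'}
--
-- 	for time in timelist:
-- 		if room in empty_by_time(two_letter_weekday, time, biglist):
-- 			room_use_dict[time] = 'free'
-- 	return room_use_dict
-- ===== SOURCE B (Python) =====
-- TIMESLOTS = ['8:30', '9:00', '9:30', '10:00', '10:30', '11:00', '11:30', '12:00', '12:30', '13:00', '13:30', '14:00',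
--              '14:30', '15:00', '15:30', '16:00', '16:30', '17:00', '17:30', '18:00', '18:30', '19:00', '19:30', '20:00', '20:30']
-- END_TIMES = ['8:20', '8:50', '9:20', '9:50', '10:20', '10:50', '11:20', '11:50', '12:20', '12:50', '13:20', '13:50', '14:20',
--              '14:50', '15:20', '15:50', '16:20', '16:50', '17:20', '17:50', '18:20', '18:50', '19:20', '19:50', '20:20']
--
--
-- def room_info(room, two_letter_weekday, biglist):
--     considered = any(
--         'buildingCode' in d and 'roomNumber' in d
--         and d['buildingCode'] + ' ' + d['roomNumber'] == room
--         for d in biglist)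
--     busy = [False] * len(TIMESLOTS)
--     for d in biglist:
--         if ('buildingCode' in d
--                 and two_letter_weekday in d.get('days', '')
--                 and d['buildingCode'] + ' ' + d.get('roomNumber', '') == room
--                 and d.get('startTime') in TIMESLOTS
--                 and d.get('endTime') in END_TIMES):
--             for i in range(TIMESLOTS.index(d['startTime']), END_TIMES.index(d['endTime'])):
--                 busy[i] = True
--     return {t: 'free' if considered and not busy[i] else 'in use'
--             for i, t in enumerate(TIMESLOTS)}
-- ===== Notes on version B (the rewrite author's own statement) =====
-- stated objective: alternative
-- what changed: A rebuilds the full free-room table 25 times (one empty_by_day call per timeslot, each scanning every room against every slot); B makes one pass over the records computing a 'considered' flag and a 25-slot busy array for the requested room, then emits the dict directly. Pre_ excludes exactly the inputs on which A raises KeyError (a record with roomNumber but no buildingCode, with buildingCode but no days, or a day-matching booking whose append loop runs without a roomNumber).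
-- intended difference: On inputs where a record of the requested room matches the day and has a recognized endTime but no startTime key, and some slot before that endTime is covered by no complete booking, A marks that slot 'in use' only because its start-scan index is left at 0 (A itself books nothing when startTime is present but unrecognized), while B skips the incomplete record and reports it 'free'; skipping is the intended treatment. — e.g. on room_info("AQ 100", "Mo", [[("buildingCode", "AQ"), ("roomNumber", "100"), ("days", "Mo"), ("endTime", "8:50")]]): A returns [("8:30", "in use"), ("9:00", "free"), ("9:30", "free"), ("10:00", "free"), ("10:30", "free"), ("11:00", "free"), ("11:…, B returns [("8:30", "free"), ("9:00", "free"), ("9:30", "free"), ("10:00", "free"), ("10:30", "free"), ("11:00", "free"), ("11:30…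
import Mathlib
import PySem

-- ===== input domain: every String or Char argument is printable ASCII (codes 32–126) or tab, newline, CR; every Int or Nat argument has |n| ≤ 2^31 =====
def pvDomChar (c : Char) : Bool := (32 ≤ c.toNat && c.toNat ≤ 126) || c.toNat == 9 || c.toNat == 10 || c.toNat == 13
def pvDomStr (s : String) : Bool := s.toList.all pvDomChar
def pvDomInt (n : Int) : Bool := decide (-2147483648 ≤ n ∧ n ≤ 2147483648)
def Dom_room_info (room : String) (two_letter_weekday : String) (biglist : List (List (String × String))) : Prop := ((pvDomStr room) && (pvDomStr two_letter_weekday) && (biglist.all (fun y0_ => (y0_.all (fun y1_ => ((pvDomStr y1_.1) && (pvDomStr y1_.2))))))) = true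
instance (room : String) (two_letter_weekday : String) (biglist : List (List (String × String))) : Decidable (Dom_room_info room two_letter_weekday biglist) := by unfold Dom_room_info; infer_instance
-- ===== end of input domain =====

-- B computes the answer in one pass over the bookings (considered flag + 25-slot busy array)
-- instead of A's rebuilding of the whole free-room table once per timeslot; B skips booking
-- records without a usable startTime, which A charges from slot 0 (see D_room_info below).
-- Pre_room_info excludes exactly the inputs on which the Python A raises KeyError.

-- ===== PORT A =====
def pvStarts : List String := ["8:30", "9:00", "9:30", "10:00", "10:30", "11:00", "11:30", "12:00", "12:30", "13:00", "13:30", "14:00", "14:30", "15:00", "15:30", "16:00", "16:30", "17:00", "17:30", "18:00", "18:30", "19:00", "19:30", "20:00", "20:30"]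
def pvEnds : List String := ["8:20", "8:50", "9:20", "9:50", "10:20", "10:50", "11:20", "11:50", "12:20", "12:50", "13:20", "13:50", "14:20", "14:50", "15:20", "15:50", "16:20", "16:50", "17:20", "17:50", "18:20", "18:50", "19:20", "19:50", "20:20"]
def pvFreeInit : PySem.Dict String (List String) := PySem.Dict.ofList [("8:30", ([] : List String)), ("9:00", ([] : List String)), ("9:30", ([] : List String)), ("10:00", ([] : List String)), ("10:30", ([] : List String)), ("11:00", ([] : List String)), ("11:30", ([] : List String)), ("12:00", ([] : List String)), ("12:30", ([] : List String)), ("13:00", ([] : List String)), ("13:30", ([] : List String)), ("14:00", ([] : List String)), ("14:30", ([] : List String)), ("15:00", ([] : List String)), ("15:30", ([] : List String)), ("16:00", ([] : List String)), ("16:30", ([] : List String)), ("17:00", ([] : List String)), ("17:30", ([] : List String)), ("18:00", ([] : List String)), ("18:30", ([] : List String)), ("19:00", ([] : List String)), ("19:30", ([] : List String)), ("20:00", ([] : List String)), ("20:30", ([] : List String))]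
def pvInUseInit : PySem.Dict String String := PySem.Dict.ofList [("8:30", "in use"), ("9:00", "in use"), ("9:30", "in use"), ("10:00", "in use"), ("10:30", "in use"), ("11:00", "in use"), ("11:30", "in use"), ("12:00", "in use"), ("12:30", "in use"), ("13:00", "in use"), ("13:30", "in use"), ("14:00", "in use"), ("14:30", "in use"), ("15:00", "in use"), ("15:30", "in use"), ("16:00", "in use"), ("16:30", "in use"), ("17:00", "in use"), ("17:30", "in use"), ("18:00", "in use"), ("18:30", "in use"), ("19:00", "in use"), ("19:30", "in use"), ("20:00", "in use"), ("20:30", "in use")]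

def all_considered_rooms (biglist : List (List (String × String))) : List String :=
  let room_dict : PySem.Dict String (List String) :=
    biglist.foldl (fun rd l =>
      let dic := PySem.Dict.ofList l
      let rd :=
        if dic.contains "buildingCode" then
          if rd.contains (dic.getD "buildingCode" "") then rd
          else rd.insert (dic.getD "buildingCode" "") []
        else rd
      if dic.contains "roomNumber" then
        if (rd.getD (dic.getD "buildingCode" "") []).contains (dic.getD "roomNumber" "") then rd
        else rd.modify (dic.getD "buildingCode" "") [] (· ++ [dic.getD "roomNumber" ""])
      else rd)
      PySem.Dict.empty
  room_dict.items.foldl (fun lrooms kv =>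
    kv.2.foldl (fun lrooms r => lrooms ++ [kv.1 ++ " " ++ r]) lrooms) []

-- the first while loop of bookings_by_day (startfound / startTimeThere collapse to the exit value of
-- check); fuel = remaining iterations, only to make the recursion structural — same computation
def startScanF (dic : PySem.Dict String String) : Nat → Nat → Nat
  | 0, check => check
  | fuel + 1, check =>
    if check < 25 then
      if dic.contains "startTime" then
        if dic.getD "startTime" "" = pvStarts.getD check "" then check
        else startScanF dic fuel (check + 1)
      else check
    else check

def startScan (dic : PySem.Dict String String) (check : Nat) : Nat :=
  startScanF dic (25 - check) check

-- the inner 'for index in range(check, checkend)' append loop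
def bookRange (df : PySem.Dict String (List String)) (dic : PySem.Dict String String)
    (check checkend : Nat) : PySem.Dict String (List String) :=
  (PySem.List.pyRange (check : Int) (checkend : Int) 1).foldl
    (fun df index => df.modify (PySem.List.pyGetD pvStarts index "") []
      (· ++ [dic.getD "buildingCode" "" ++ " " ++ dic.getD "roomNumber" ""])) df

-- the second while loop of bookings_by_day (fuel as above)
def endScanF (df : PySem.Dict String (List String)) (dic : PySem.Dict String String)
    (check : Nat) : Nat → Nat → PySem.Dict String (List String)
  | 0, _ => df
  | fuel + 1, checkend =>
    if checkend < 25 then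
      if dic.contains "endTime" then
        if dic.getD "endTime" "" = pvEnds.getD checkend "" then bookRange df dic check checkend
        else endScanF df dic check fuel (checkend + 1)
      else df
    else df

def endScan (df : PySem.Dict String (List String)) (dic : PySem.Dict String String)
    (check checkend : Nat) : PySem.Dict String (List String) :=
  endScanF df dic check (25 - checkend) checkend

def bookings_by_day (two_letter_weekday : String) (biglist : List (List (String × String))) :
    PySem.Dict String (List String) :=
  biglist.foldl (fun df l =>
    let dic := PySem.Dict.ofList l
    if dic.contains "buildingCode" then
      if PySem.Str.isIn two_letter_weekday (dic.getD "days" "") then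
        endScan df dic (startScan dic 0) 0
      else df
    else df) pvFreeInit

def empty_by_day (two_letter_weekday : String) (biglist : List (List (String × String))) :
    PySem.Dict String (List String) :=
  let dfull := bookings_by_day two_letter_weekday biglist
  let lrooms := all_considered_rooms biglist
  lrooms.foldl (fun frd r =>
    pvStarts.foldl (fun frd t =>
      if (dfull.getD t []).contains r then frd else frd.modify t [] (· ++ [r])) frd) pvFreeInit

def empty_by_time (two_letter_weekday : String) (start_time : String)
    (biglist : List (List (String × String))) : Option (List String) :=
  let day_room_dict := empty_by_day two_letter_weekday biglist
  if day_room_dict.contains start_time then some (day_room_dict.getD start_time []) else none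

def room_info (room : String) (two_letter_weekday : String)
    (biglist : List (List (String × String))) : List (String × String) :=
  (pvStarts.foldl (fun rud t =>
      match empty_by_time two_letter_weekday t biglist with
      | some lst => if lst.contains room then rud.insert t "free" else rud
      | none => rud) pvInUseInit).items

-- ===== PORT B =====
def room_info_alt (room : String) (two_letter_weekday : String)
    (biglist : List (List (String × String))) : List (String × String) :=
  let considered := biglist.any (fun l =>
    let d := PySem.Dict.ofList l
    d.contains "buildingCode" && d.contains "roomNumber" &&
      (d.getD "buildingCode" "" ++ " " ++ d.getD "roomNumber" "" == room))
  let busy := biglist.foldl (fun (busy : List Bool) (l : List (String × String)) =>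
    let d := PySem.Dict.ofList l
    if d.contains "buildingCode" && PySem.Str.isIn two_letter_weekday (d.getD "days" "") &&
        (d.getD "buildingCode" "" ++ " " ++ d.getD "roomNumber" "" == room) &&
        (d.get? "startTime").any (fun st => pvStarts.contains st) &&
        (d.get? "endTime").any (fun et => pvEnds.contains et) then
      (List.range' (pvStarts.idxOf (d.getD "startTime" ""))
          (pvEnds.idxOf (d.getD "endTime" "") - pvStarts.idxOf (d.getD "startTime" ""))).foldl
        (fun busy i => busy.set i true) busy
    else busy) (List.replicate 25 false)
  pvStarts.zipIdx.map (fun p =>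
    (p.1, if considered && !(busy.getD p.2 false) then "free" else "in use"))

-- ===== PRECONDITION & SPEC =====
-- start slot A charges a booking from: its index if recognized, 25 if unrecognized, 0 if absent
def pvPreStart (l : List (String × String)) : Nat :=
  match (PySem.Dict.ofList l).get? "startTime" with
  | some st => if st ∈ pvStarts then pvStarts.idxOf st else 25
  | none => 0

-- Pre_ excludes exactly the inputs where the Python A raises KeyError: a dict with 'roomNumber' but no
-- 'buildingCode', a dict with 'buildingCode' but no 'days', and a matched-day booking whose append loop
-- actually runs (start slot < end slot) but has no 'roomNumber'.
def Pre_room_info (room : String) (two_letter_weekday : String)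
    (biglist : List (List (String × String))) : Prop :=
  ∀ l ∈ biglist,
    ((PySem.Dict.ofList l).contains "roomNumber" = true →
      (PySem.Dict.ofList l).contains "buildingCode" = true) ∧
    ((PySem.Dict.ofList l).contains "buildingCode" = true →
      (PySem.Dict.ofList l).contains "days" = true) ∧
    ((PySem.Dict.ofList l).contains "buildingCode" = true →
      PySem.Str.isIn two_letter_weekday ((PySem.Dict.ofList l).getD "days" "") = true →
      (PySem.Dict.ofList l).contains "endTime" = true →
      (PySem.Dict.ofList l).getD "endTime" "" ∈ pvEnds →
      pvPreStart l < pvEnds.idxOf ((PySem.Dict.ofList l).getD "endTime" "") →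
      (PySem.Dict.ofList l).contains "roomNumber" = true)

instance (room : String) (two_letter_weekday : String) (biglist : List (List (String × String))) :
    Decidable (Pre_room_info room two_letter_weekday biglist) := by
  unfold Pre_room_info; infer_instance

def pvWitness_room_info : String × String × (List (List (String × String))) :=
  ("AQ 100", "Mo",
    [[("buildingCode", "AQ"), ("roomNumber", "100"), ("days", "MoWe"),
      ("startTime", "9:00"), ("endTime", "9:50")]])

-- field k of record l (Python dict semantics)
def pvF (l : List (String × String)) (k : String) : Option String := (PySem.Dict.ofList l).get? k

-- does record l book room `room` at slot i on that day, with recognized start and end times?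
def pvCovers (room two_letter_weekday : String) (l : List (String × String)) (i : Nat) : Bool :=
  match pvF l "startTime", pvF l "endTime" with
  | some st, some et =>
    (pvF l "buildingCode").isSome && PySem.Str.isIn two_letter_weekday ((pvF l "days").getD "") &&
    ((pvF l "buildingCode").getD "" ++ " " ++ (pvF l "roomNumber").getD "" == room) &&
    decide (et ∈ pvEnds ∧ pvStarts.idxOf st ≤ i ∧ i < pvEnds.idxOf et)
  | _, _ => false

-- On inputs where a record of the requested room matches the day and has a recognized endTime but NO
-- startTime key, and some slot before that endTime is covered by no complete booking, A marks that slot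
-- 'in use' (its start-scan index is left at 0) while B skips the incomplete record and reports it 'free';
-- skipping is the intended behaviour (A itself books nothing when startTime is present but unrecognized).
def D_room_info (room : String) (two_letter_weekday : String)
    (biglist : List (List (String × String))) : Prop :=
  ∃ l ∈ biglist,
    (∃ kv ∈ l, kv.1 = "buildingCode") ∧
    pvF l "startTime" = none ∧
    PySem.Str.isIn two_letter_weekday ((pvF l "days").getD "") = true ∧
    (pvF l "endTime").getD "" ∈ pvEnds ∧
    (pvF l "buildingCode").getD "" ++ " " ++ (pvF l "roomNumber").getD "" = room ∧
    ∃ i ∈ List.range (pvEnds.idxOf ((pvF l "endTime").getD "")),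
      ¬ ∃ l2 ∈ biglist, pvCovers room two_letter_weekday l2 i = true

instance (room : String) (two_letter_weekday : String) (biglist : List (List (String × String))) :
    Decidable (D_room_info room two_letter_weekday biglist) := by
  unfold D_room_info; infer_instance

def Spec_room_info (room : String) (two_letter_weekday : String) (biglist : List (List (String × String))) (out : List (String × String)) : Prop := ¬ D_room_info room two_letter_weekday biglist → out = room_info_alt room two_letter_weekday biglist
instance (room : String) (two_letter_weekday : String) (biglist : List (List (String × String))) (out : List (String × String)) : Decidable (Spec_room_info room two_letter_weekday biglist out) := by unfold Spec_room_info; infer_instance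

def pvDiffWitness_room_info : String × String × (List (List (String × String))) :=
  ("AQ 100", "Mo", [[("buildingCode", "AQ"), ("roomNumber", "100"), ("days", "Mo"), ("endTime", "8:50")]])

def pvDiffWitnessOut_room_info : (List (String × String)) × (List (String × String)) :=
  ([("8:30", "in use"), ("9:00", "free"), ("9:30", "free"), ("10:00", "free"), ("10:30", "free"), ("11:00", "free"), ("11:30", "free"), ("12:00", "free"), ("12:30", "free"), ("13:00", "free"), ("13:30", "free"), ("14:00", "free"), ("14:30", "free"), ("15:00", "free"), ("15:30", "free"), ("16:00", "free"), ("16:30", "free"), ("17:00", "free"), ("17:30", "free"), ("18:00", "free"), ("18:30", "free"), ("19:00", "free"), ("19:30", "free"), ("20:00", "free"), ("20:30", "free")],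
   [("8:30", "free"), ("9:00", "free"), ("9:30", "free"), ("10:00", "free"), ("10:30", "free"), ("11:00", "free"), ("11:30", "free"), ("12:00", "free"), ("12:30", "free"), ("13:00", "free"), ("13:30", "free"), ("14:00", "free"), ("14:30", "free"), ("15:00", "free"), ("15:30", "free"), ("16:00", "free"), ("16:30", "free"), ("17:00", "free"), ("17:30", "free"), ("18:00", "free"), ("18:30", "free"), ("19:00", "free"), ("19:30", "free"), ("20:00", "free"), ("20:30", "free")])

-- ===== CLAIM (what is proved, stated in full; the proofs are below) =====
def Claim_unchanged_room_info : Prop := ∀ (room : String) (two_letter_weekday : String) (biglist : List (List (String × String))), Dom_room_info room two_letter_weekday biglist → Pre_room_info room two_letter_weekday biglist → Spec_room_info room two_letter_weekday biglist (room_info room two_letter_weekday biglist)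
def Claim_changed_room_info : Prop := Dom_room_info (pvDiffWitness_room_info.1) (pvDiffWitness_room_info.2.1) (pvDiffWitness_room_info.2.2) ∧ Pre_room_info (pvDiffWitness_room_info.1) (pvDiffWitness_room_info.2.1) (pvDiffWitness_room_info.2.2) ∧ D_room_info (pvDiffWitness_room_info.1) (pvDiffWitness_room_info.2.1) (pvDiffWitness_room_info.2.2) ∧ room_info (pvDiffWitness_room_info.1) (pvDiffWitness_room_info.2.1) (pvDiffWitness_room_info.2.2) = pvDiffWitnessOut_room_info.1 ∧ room_info_alt (pvDiffWitness_room_info.1) (pvDiffWitness_room_info.2.1) (pvDiffWitness_room_info.2.2) = pvDiffWitnessOut_room_info.2 ∧ pvDiffWitnessOut_room_info.1 ≠ pvDiffWitnessOut_room_info.2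

def Claim_exact_room_info : Prop := ∀ (room : String) (two_letter_weekday : String) (biglist : List (List (String × String))), Dom_room_info room two_letter_weekday biglist → Pre_room_info room two_letter_weekday biglist → D_room_info room two_letter_weekday biglist → room_info room two_letter_weekday biglist ≠ room_info_alt room two_letter_weekday biglist

-- ===== LEMMAS AND PROOFS =====
-- proof-side abbreviations ------------------------------------------------

-- 'building roomNumber' label of a record (missing keys read as "")
def pvLabel (l : List (String × String)) : String :=
  (PySem.Dict.ofList l).getD "buildingCode" "" ++ " " ++ (PySem.Dict.ofList l).getD "roomNumber" ""


-- is the room one of the rooms the data set offers classes at?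
def pvConsidered (room : String) (biglist : List (List (String × String))) : Bool :=
  biglist.any (fun l =>
    (PySem.Dict.ofList l).contains "roomNumber" &&
    (PySem.Dict.ofList l).contains "buildingCode" && (pvLabel l == room))

-- does this record book the room on that day at all (building present, day matches, room matches)?
def pvDayRoom (room : String) (two_letter_weekday : String) (l : List (String × String)) : Bool :=
  (PySem.Dict.ofList l).contains "buildingCode" &&
  PySem.Str.isIn two_letter_weekday ((PySem.Dict.ofList l).getD "days" "") &&
  (pvLabel l == room)

-- a complete booking of the room covering slot i (recognized start and end times)
def pvRealBook (room : String) (two_letter_weekday : String) (l : List (String × String)) (i : Nat) : Bool :=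
  pvDayRoom room two_letter_weekday l &&
    (match (PySem.Dict.ofList l).get? "startTime", (PySem.Dict.ofList l).get? "endTime" with
     | some st, some et => pvStarts.contains st && pvEnds.contains et &&
         decide (pvStarts.idxOf st ≤ i ∧ i < pvEnds.idxOf et)
     | _, _ => false)

-- a booking of the room with a recognized endTime past slot i but NO startTime key at all
def pvPhantomBook (room : String) (two_letter_weekday : String) (l : List (String × String)) (i : Nat) : Bool :=
  pvDayRoom room two_letter_weekday l &&
    (match (PySem.Dict.ofList l).get? "startTime", (PySem.Dict.ofList l).get? "endTime" with
     | none, some et => pvEnds.contains et && decide (i < pvEnds.idxOf et)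
     | _, _ => false)


def eIdx (l : List (String × String)) : Nat := pvEnds.idxOf ((PySem.Dict.ofList l).getD "endTime" "")

-- A-side per-dict condition for "this dict books slot i"
def BooksAt (wd : String) (l : List (String × String)) (i : Nat) : Prop :=
  (PySem.Dict.ofList l).contains "buildingCode" = true ∧
  PySem.Str.isIn wd ((PySem.Dict.ofList l).getD "days" "") = true ∧
  (PySem.Dict.ofList l).contains "endTime" = true ∧
  (PySem.Dict.ofList l).getD "endTime" "" ∈ pvEnds ∧
  startScan (PySem.Dict.ofList l) 0 ≤ i ∧ i < eIdx l

-- generic fold lemmas -----------------------------------------------------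

lemma mem_getD_foldl_modifyApp {α : Type} (xs : List α) (P : α → Bool) (key : α → String)
    (v : α → String) (d : PySem.Dict String (List String)) (k y : String) :
    (y ∈ (xs.foldl (fun d x => if P x then d.modify (key x) [] (· ++ [v x]) else d) d).getD k [])
      ↔ y ∈ d.getD k [] ∨ ∃ x ∈ xs, P x = true ∧ key x = k ∧ y = v x := by
  induction xs generalizing d with
  | nil => simp
  | cons x xs ih =>
    simp only [List.foldl_cons]
    rw [ih, List.exists_mem_cons_iff]
    have hstep : y ∈ (if P x then d.modify (key x) [] (· ++ [v x]) else d).getD k []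
        ↔ y ∈ d.getD k [] ∨ (P x = true ∧ key x = k ∧ y = v x) := by
      by_cases hp : P x
      · rw [if_pos hp, PySem.Dict.getD_modify]
        by_cases hk : k = key x
        · rw [if_pos hk, hk, List.mem_append, List.mem_singleton]
          constructor
          · rintro (h | h)
            · exact Or.inl h
            · exact Or.inr ⟨hp, rfl, h⟩
          · rintro (h | ⟨_, _, h⟩)
            · exact Or.inl h
            · exact Or.inr h
        · rw [if_neg hk]
          constructor
          · exact Or.inl
          · rintro (h | ⟨_, hkk, _⟩)
            · exact h
            · exact absurd hkk.symm hk
      · rw [if_neg hp]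
        constructor
        · exact Or.inl
        · rintro (h | ⟨hpp, _⟩)
          · exact h
          · exact absurd hpp hp
    rw [hstep]
    tauto

lemma contains_foldl_mono {α : Type} (xs : List α)
    (f : PySem.Dict String (List String) → α → PySem.Dict String (List String))
    (hf : ∀ d x k, d.contains k = true → (f d x).contains k = true)
    (d : PySem.Dict String (List String)) (k : String) (h : d.contains k = true) :
    (xs.foldl f d).contains k = true := by
  induction xs generalizing d with
  | nil => exact h
  | cons x xs ih => exact ih _ (hf _ _ _ h)

lemma getD_foldl_insert_if (P : String → Bool) (w : String) :
    ∀ (ts : List String) (d : PySem.Dict String String) (k : String) (v0 : String),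
      (ts.foldl (fun d t => if P t then d.insert t w else d) d).getD k v0
        = if k ∈ ts ∧ P k = true then w else d.getD k v0 := by
  intro ts
  induction ts with
  | nil => simp
  | cons t ts ih =>
    intro d k v0
    simp only [List.foldl_cons]
    rw [ih]
    by_cases hmem : k ∈ ts ∧ P k = true
    · rw [if_pos hmem, if_pos ⟨List.mem_cons_of_mem _ hmem.1, hmem.2⟩]
    · rw [if_neg hmem]
      by_cases hp : P t
      · rw [if_pos hp, PySem.Dict.getD_insert]
        by_cases hk : k = t
        · subst hk
          rw [if_pos rfl, if_pos ⟨List.mem_cons_self, hp⟩]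
        · rw [if_neg hk, if_neg ?_]
          rintro ⟨h1, hPk⟩
          rcases List.mem_cons.1 h1 with rfl | hm
          · exact hk rfl
          · exact hmem ⟨hm, hPk⟩
      · rw [if_neg hp, if_neg ?_]
        rintro ⟨h1, hPk⟩
        rcases List.mem_cons.1 h1 with rfl | hm
        · exact hp hPk
        · exact hmem ⟨hm, hPk⟩

lemma keys_foldl_insert_if (P : String → Bool) (w : String) :
    ∀ (ts : List String) (d : PySem.Dict String String), (∀ t ∈ ts, d.contains t = true) →
      (ts.foldl (fun d t => if P t then d.insert t w else d) d).keys = d.keys := by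
  intro ts
  induction ts with
  | nil => simp
  | cons t ts ih =>
    intro d hd
    simp only [List.foldl_cons]
    by_cases hp : P t
    · rw [if_pos hp, ih, PySem.Dict.keys_insert_of_contains _ _ (hd t (by simp))]
      intro t' ht'
      rw [PySem.Dict.contains_insert]
      simp [hd t' (List.mem_cons_of_mem _ ht')]
    · rw [if_neg hp, ih _ (fun t' ht' => hd t' (List.mem_cons_of_mem _ ht'))]

lemma getD_foldl_set (js : List Nat) :
    ∀ (b : List Bool) (i : Nat), i < b.length →
      ((js.foldl (fun b j => b.set j true) b).getD i false = true ↔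
        b.getD i false = true ∨ i ∈ js) := by
  induction js with
  | nil => simp
  | cons j js ih =>
    intro b i hi
    simp only [List.foldl_cons]
    rw [ih _ _ (by simpa using hi)]
    simp only [List.getD, List.getElem?_set, List.mem_cons]
    by_cases hj : j = i
    · subst hj; simp [hi]
    · simp [hj]; tauto

lemma length_foldl_set (js : List Nat) : ∀ (b : List Bool),
    (js.foldl (fun b j => b.set j true) b).length = b.length := by
  induction js with
  | nil => simp
  | cons j js ih => intro b; simp [List.foldl_cons, ih]

-- the while loops, in closed form ----------------------------------------

lemma startScanF_eq (dic : PySem.Dict String String) :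
    ∀ (n check : Nat), 25 - check = n → check ≤ 25 →
      startScanF dic n check =
        if dic.contains "startTime" = true then
          (if (dic.getD "startTime" "") ∈ pvStarts.drop check
            then check + (pvStarts.drop check).idxOf (dic.getD "startTime" "")
            else 25)
        else check := by
  intro n
  induction n with
  | zero =>
    intro check h1 h2
    have hc : check = 25 := by omega
    subst hc
    rw [startScanF]
    simp [show pvStarts.drop 25 = [] from rfl]
  | succ n ih =>
    intro check h1 h2
    have hlt : check < 25 := by omega
    have hdrop : pvStarts.drop check = pvStarts[check]'(by simp [pvStarts]; omega) :: pvStarts.drop (check + 1) :=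
      List.drop_eq_getElem_cons (by simp [pvStarts]; omega)
    have hgetD : pvStarts.getD check "" = pvStarts[check]'(by simp [pvStarts]; omega) := by
      simp [List.getD, List.getElem?_eq_getElem (by simp [pvStarts]; omega : check < pvStarts.length)]
    rw [startScanF, if_pos hlt]
    by_cases hc : dic.contains "startTime" = true
    · rw [if_pos hc, if_pos hc]
      by_cases he : dic.getD "startTime" "" = pvStarts.getD check ""
      · rw [if_pos he, hdrop]
        have : dic.getD "startTime" "" ∈ (pvStarts[check]'(by simp [pvStarts]; omega) :: pvStarts.drop (check + 1)) := by
          rw [he, hgetD]; exact List.mem_cons_self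
        rw [if_pos this, List.idxOf_cons]
        rw [show (pvStarts[check]'(by simp [pvStarts]; omega) == dic.getD "startTime" "") = true by
          rw [he, hgetD]; simp]
        simp
      · rw [if_neg he, ih (check + 1) (by omega) (by omega), if_pos hc, hdrop]
        have hne : pvStarts[check]'(by simp [pvStarts]; omega) ≠ dic.getD "startTime" "" := by
          rw [← hgetD]; exact fun h => he h.symm
        by_cases hm : dic.getD "startTime" "" ∈ pvStarts.drop (check + 1)
        · rw [if_pos hm, if_pos (List.mem_cons_of_mem _ hm), List.idxOf_cons]
          rw [show (pvStarts[check]'(by simp [pvStarts]; omega) == dic.getD "startTime" "") = false by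
            simp [hne]]
          simp; omega
        · rw [if_neg hm, if_neg ?_]
          intro h
          rcases List.mem_cons.1 h with h | h
          · exact hne h.symm
          · exact hm h
    · rw [if_neg hc, if_neg hc]

lemma startScan_eq (dic : PySem.Dict String String) (check : Nat) (h2 : check ≤ 25) :
    startScan dic check =
      if dic.contains "startTime" = true then
        (if (dic.getD "startTime" "") ∈ pvStarts.drop check
          then check + (pvStarts.drop check).idxOf (dic.getD "startTime" "")
          else 25)
      else check :=
  startScanF_eq dic (25 - check) check rfl h2

lemma endScanF_eq (df : PySem.Dict String (List String)) (dic : PySem.Dict String String) (check : Nat) :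
    ∀ (n checkend : Nat), 25 - checkend = n → checkend ≤ 25 →
      endScanF df dic check n checkend =
        if dic.contains "endTime" = true ∧ (dic.getD "endTime" "") ∈ pvEnds.drop checkend
        then bookRange df dic check (checkend + (pvEnds.drop checkend).idxOf (dic.getD "endTime" ""))
        else df := by
  intro n
  induction n with
  | zero =>
    intro checkend h1 h2
    have hc : checkend = 25 := by omega
    subst hc
    rw [endScanF]
    simp [show pvEnds.drop 25 = [] from rfl]
  | succ n ih =>
    intro checkend h1 h2
    have hlt : checkend < 25 := by omega
    have hdrop : pvEnds.drop checkend = pvEnds[checkend]'(by simp [pvEnds]; omega) :: pvEnds.drop (checkend + 1) :=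
      List.drop_eq_getElem_cons (by simp [pvEnds]; omega)
    have hgetD : pvEnds.getD checkend "" = pvEnds[checkend]'(by simp [pvEnds]; omega) := by
      simp [List.getD, List.getElem?_eq_getElem (by simp [pvEnds]; omega : checkend < pvEnds.length)]
    rw [endScanF, if_pos hlt]
    by_cases hc : dic.contains "endTime" = true
    · rw [if_pos hc]
      by_cases he : dic.getD "endTime" "" = pvEnds.getD checkend ""
      · rw [if_pos he, hdrop]
        have hmem : dic.getD "endTime" "" ∈ (pvEnds[checkend]'(by simp [pvEnds]; omega) :: pvEnds.drop (checkend + 1)) := by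
          rw [he, hgetD]; exact List.mem_cons_self
        rw [if_pos ⟨hc, hmem⟩, List.idxOf_cons]
        rw [show (pvEnds[checkend]'(by simp [pvEnds]; omega) == dic.getD "endTime" "") = true by
          rw [he, hgetD]; simp]
        simp
      · rw [if_neg he, ih (checkend + 1) (by omega) (by omega), hdrop]
        have hne : pvEnds[checkend]'(by simp [pvEnds]; omega) ≠ dic.getD "endTime" "" := by
          rw [← hgetD]; exact fun h => he h.symm
        by_cases hm : dic.getD "endTime" "" ∈ pvEnds.drop (checkend + 1)
        · rw [if_pos ⟨hc, hm⟩, if_pos ⟨hc, List.mem_cons_of_mem _ hm⟩, List.idxOf_cons]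
          rw [show (pvEnds[checkend]'(by simp [pvEnds]; omega) == dic.getD "endTime" "") = false by
            simp [hne]]
          simp only [cond_false]
          congr 1
          omega
        · rw [if_neg (fun h => hm h.2), if_neg ?_]
          rintro ⟨-, h⟩
          rcases List.mem_cons.1 h with h | h
          · exact hne h.symm
          · exact hm h
    · rw [if_neg hc, if_neg (fun h => hc h.1)]

lemma endScan_eq (df : PySem.Dict String (List String)) (dic : PySem.Dict String String)
    (check checkend : Nat) (h2 : checkend ≤ 25) :
    endScan df dic check checkend =
      if dic.contains "endTime" = true ∧ (dic.getD "endTime" "") ∈ pvEnds.drop checkend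
      then bookRange df dic check (checkend + (pvEnds.drop checkend).idxOf (dic.getD "endTime" ""))
      else df :=
  endScanF_eq df dic check (25 - checkend) checkend rfl h2

-- facts about the timetable constants ------------------------------------

lemma pvStarts_nodup : pvStarts.Nodup := by decide

lemma getD_mem_pvStarts (i : Nat) (hi : i < 25) : pvStarts.getD i "" ∈ pvStarts := by
  have h : i < pvStarts.length := by simp [pvStarts]; omega
  rw [List.getD, List.getElem?_eq_getElem h]
  exact List.getElem_mem h

lemma getD_pvStarts_inj {i j : Nat} (hi : i < 25) (hj : j < 25)
    (h : pvStarts.getD i "" = pvStarts.getD j "") : i = j := by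
  have hi' : i < pvStarts.length := by simp [pvStarts]; omega
  have hj' : j < pvStarts.length := by simp [pvStarts]; omega
  rw [List.getD, List.getElem?_eq_getElem hi', List.getD, List.getElem?_eq_getElem hj'] at h
  exact (List.Nodup.getElem_inj_iff pvStarts_nodup).1 h

lemma pvFreeInit_getD (t : String) (ht : t ∈ pvStarts) : pvFreeInit.getD t [] = [] := by
  fin_cases ht <;> rfl

lemma pvFreeInit_contains (t : String) (ht : t ∈ pvStarts) : pvFreeInit.contains t = true := by
  fin_cases ht <;> rfl

lemma pvInUseInit_getD (t : String) (ht : t ∈ pvStarts) : pvInUseInit.getD t "" = "in use" := by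
  fin_cases ht <;> rfl

lemma pvInUseInit_contains (t : String) (ht : t ∈ pvStarts) : pvInUseInit.contains t = true := by
  fin_cases ht <;> rfl

lemma pvInUseInit_keys : pvInUseInit.keys = pvStarts := by rfl

lemma pvInUseInit_nodup : pvInUseInit.keys.Nodup := by rw [pvInUseInit_keys]; exact pvStarts_nodup

lemma mem_pvEnds_idx_lt {et : String} (h : et ∈ pvEnds) : pvEnds.idxOf et < 25 :=
  List.idxOf_lt_length_of_mem h

-- bookRange ---------------------------------------------------------------

lemma mem_getD_bookRange (df : PySem.Dict String (List String)) (dic : PySem.Dict String String)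
    (check e : Nat) (he : e ≤ 25) (i : Nat) (hi : i < 25) (y : String) :
    y ∈ (bookRange df dic check e).getD (pvStarts.getD i "") [] ↔
      y ∈ df.getD (pvStarts.getD i "") [] ∨
        (check ≤ i ∧ i < e ∧ y = dic.getD "buildingCode" "" ++ " " ++ dic.getD "roomNumber" "") := by
  unfold bookRange
  have h := mem_getD_foldl_modifyApp (PySem.List.pyRange (check : Int) (e : Int) 1)
    (fun _ => true) (fun index => PySem.List.pyGetD pvStarts index "")
    (fun _ => dic.getD "buildingCode" "" ++ " " ++ dic.getD "roomNumber" "") df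
    (pvStarts.getD i "") y
  simp only [if_true] at h
  rw [h]
  constructor
  · rintro (hy | ⟨x, hx, -, hkey, hy⟩)
    · exact Or.inl hy
    · rcases PySem.List.mem_pyRange_one.1 hx with ⟨hx1, hx2⟩
      have hx0 : (0 : Int) ≤ x := le_trans (by positivity) hx1
      obtain ⟨m, rfl⟩ := Int.eq_ofNat_of_zero_le hx0
      rw [PySem.List.pyGetD_natCast] at hkey
      have hm25 : m < 25 := by omega
      have := getD_pvStarts_inj hm25 hi hkey
      subst this
      exact Or.inr ⟨by omega, by omega, hy⟩
  · rintro (hy | ⟨h1, h2, hy⟩)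
    · exact Or.inl hy
    · refine Or.inr ⟨(i : Int), PySem.List.mem_pyRange_one.2 ⟨by omega, by omega⟩, trivial, ?_, hy⟩
      rw [PySem.List.pyGetD_natCast]

-- bookings_by_day characterization ---------------------------------------

lemma mem_getD_bookings (wd : String) (biglist : List (List (String × String)))
    (i : Nat) (hi : i < 25) (y : String) :
    y ∈ (bookings_by_day wd biglist).getD (pvStarts.getD i "") [] ↔
      ∃ l ∈ biglist, BooksAt wd l i ∧ y = pvLabel l := by
  unfold bookings_by_day
  suffices h : ∀ d, (y ∈ (biglist.foldl (fun df l =>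
      let dic := PySem.Dict.ofList l
      if dic.contains "buildingCode" then
        if PySem.Str.isIn wd (dic.getD "days" "") then
          endScan df dic (startScan dic 0) 0
        else df
      else df) d).getD (pvStarts.getD i "") [] ↔
      y ∈ d.getD (pvStarts.getD i "") [] ∨ ∃ l ∈ biglist, BooksAt wd l i ∧ y = pvLabel l) by
    rw [h pvFreeInit, pvFreeInit_getD _ (getD_mem_pvStarts i hi)]
    simp
  intro d
  induction biglist generalizing d with
  | nil => simp
  | cons l ls ih =>
    simp only [List.foldl_cons]
    rw [ih, List.exists_mem_cons_iff]
    have hstep : y ∈ ((if (PySem.Dict.ofList l).contains "buildingCode" then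
        if PySem.Str.isIn wd ((PySem.Dict.ofList l).getD "days" "") then
          endScan d (PySem.Dict.ofList l) (startScan (PySem.Dict.ofList l) 0) 0
        else d
      else d)).getD (pvStarts.getD i "") [] ↔
        y ∈ d.getD (pvStarts.getD i "") [] ∨ (BooksAt wd l i ∧ y = pvLabel l) := by
      by_cases hbc : (PySem.Dict.ofList l).contains "buildingCode"
      · rw [if_pos hbc]
        by_cases hdy : PySem.Str.isIn wd ((PySem.Dict.ofList l).getD "days" "")
        · rw [if_pos hdy, endScan_eq _ _ _ 0 (by omega)]
          simp only [List.drop_zero, Nat.zero_add]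
          by_cases het : (PySem.Dict.ofList l).contains "endTime" = true ∧
              (PySem.Dict.ofList l).getD "endTime" "" ∈ pvEnds
          · rw [if_pos het]
            rw [mem_getD_bookRange _ _ _ _ (List.idxOf_le_length) _ hi]
            · constructor
              · rintro (hy | ⟨h1, h2, hy⟩)
                · exact Or.inl hy
                · exact Or.inr ⟨⟨hbc, hdy, het.1, het.2, h1, h2⟩, hy⟩
              · rintro (hy | ⟨⟨-, -, -, -, h1, h2⟩, hy⟩)
                · exact Or.inl hy
                · exact Or.inr ⟨h1, h2, hy⟩
          · rw [if_neg het]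
            constructor
            · exact Or.inl
            · rintro (hy | ⟨⟨-, -, h3, h4, -⟩, -⟩)
              · exact hy
              · exact absurd ⟨h3, h4⟩ het
        · rw [if_neg hdy]
          constructor
          · exact Or.inl
          · rintro (hy | ⟨⟨-, h2, -⟩, -⟩)
            · exact hy
            · exact absurd h2 hdy
      · rw [if_neg hbc]
        constructor
        · exact Or.inl
        · rintro (hy | ⟨⟨h1, -⟩, -⟩)
          · exact hy
          · exact absurd h1 hbc
    rw [hstep]
    tauto

-- all_considered_rooms characterization ----------------------------------

lemma mem_foldl_append_singleton {α : Type} (xs : List α) (f : α → String) :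
    ∀ (acc : List String) (y : String),
      y ∈ xs.foldl (fun acc x => acc ++ [f x]) acc ↔ y ∈ acc ∨ ∃ x ∈ xs, y = f x := by
  induction xs with
  | nil => simp
  | cons x xs ih =>
    intro acc y
    simp only [List.foldl_cons]
    rw [ih, List.exists_mem_cons_iff, List.mem_append, List.mem_singleton]
    tauto

lemma mem_acr_flatten (rd : PySem.Dict String (List String)) (hnd : rd.keys.Nodup) (y : String) :
    y ∈ rd.items.foldl (fun lrooms kv =>
        kv.2.foldl (fun lrooms r => lrooms ++ [kv.1 ++ " " ++ r]) lrooms) [] ↔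
      ∃ k r, r ∈ rd.getD k [] ∧ y = k ++ " " ++ r := by
  have hgen : ∀ (its : List (String × List String)) (acc : List String),
      y ∈ its.foldl (fun lrooms kv =>
          kv.2.foldl (fun lrooms r => lrooms ++ [kv.1 ++ " " ++ r]) lrooms) acc ↔
        y ∈ acc ∨ ∃ kv ∈ its, ∃ r ∈ kv.2, y = kv.1 ++ " " ++ r := by
    intro its
    induction its with
    | nil => simp
    | cons kv its ih =>
      intro acc
      simp only [List.foldl_cons]
      rw [ih, mem_foldl_append_singleton, List.exists_mem_cons_iff]
      constructor
      · rintro ((h | ⟨x, hx, hy⟩) | ⟨kv', hkv', r', hr', hy⟩)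
        · exact Or.inl h
        · exact Or.inr (Or.inl ⟨x, hx, hy⟩)
        · exact Or.inr (Or.inr ⟨kv', hkv', r', hr', hy⟩)
      · rintro (h | ⟨x, hx, hy⟩ | ⟨kv', hkv', r', hr', hy⟩)
        · exact Or.inl (Or.inl h)
        · exact Or.inl (Or.inr ⟨x, hx, hy⟩)
        · exact Or.inr ⟨kv', hkv', r', hr', hy⟩
  rw [hgen]
  simp only [List.not_mem_nil, false_or]
  constructor
  · rintro ⟨⟨k, vs⟩, hkv, r, hr, hy⟩
    exact ⟨k, r, by rw [PySem.Dict.getD_of_mem_items rd hkv hnd []]; exact hr, hy⟩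
  · rintro ⟨k, r, hr, hy⟩
    have hcon : rd.get? k ≠ none := by
      intro hnone
      rw [PySem.Dict.getD_eq_get?_getD, hnone] at hr
      simp at hr
    obtain ⟨vs, hvs⟩ := Option.ne_none_iff_exists'.1 hcon
    refine ⟨(k, vs), PySem.Dict.mem_items_of_get?_eq_some rd hvs, r, ?_, hy⟩
    rw [PySem.Dict.getD_eq_get?_getD, hvs] at hr
    exact hr

lemma acr_fold_inv (biglist : List (List (String × String)))
    (h1 : ∀ l ∈ biglist, (PySem.Dict.ofList l).contains "roomNumber" = true →
      (PySem.Dict.ofList l).contains "buildingCode" = true) :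
    ∀ (d : PySem.Dict String (List String)), d.keys.Nodup →
      (biglist.foldl (fun rd l =>
        let dic := PySem.Dict.ofList l
        let rd :=
          if dic.contains "buildingCode" then
            if rd.contains (dic.getD "buildingCode" "") then rd
            else rd.insert (dic.getD "buildingCode" "") []
          else rd
        if dic.contains "roomNumber" then
          if (rd.getD (dic.getD "buildingCode" "") []).contains (dic.getD "roomNumber" "") then rd
          else rd.modify (dic.getD "buildingCode" "") [] (· ++ [dic.getD "roomNumber" ""])
        else rd) d).keys.Nodup ∧
      ∀ (k r : String),
        r ∈ (biglist.foldl (fun rd l =>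
          let dic := PySem.Dict.ofList l
          let rd :=
            if dic.contains "buildingCode" then
              if rd.contains (dic.getD "buildingCode" "") then rd
              else rd.insert (dic.getD "buildingCode" "") []
            else rd
          if dic.contains "roomNumber" then
            if (rd.getD (dic.getD "buildingCode" "") []).contains (dic.getD "roomNumber" "") then rd
            else rd.modify (dic.getD "buildingCode" "") [] (· ++ [dic.getD "roomNumber" ""])
          else rd) d).getD k [] ↔
        r ∈ d.getD k [] ∨ ∃ l ∈ biglist, (PySem.Dict.ofList l).contains "roomNumber" = true ∧
          (PySem.Dict.ofList l).getD "buildingCode" "" = k ∧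
          (PySem.Dict.ofList l).getD "roomNumber" "" = r := by
  induction biglist with
  | nil => intro d hnd; exact ⟨hnd, by simp⟩
  | cons l ls ih =>
    intro d hnd
    have h1l := h1 l (List.mem_cons_self)
    have h1' : ∀ l' ∈ ls, (PySem.Dict.ofList l').contains "roomNumber" = true →
        (PySem.Dict.ofList l').contains "buildingCode" = true :=
      fun l' hl' => h1 l' (List.mem_cons_of_mem _ hl')
    set d1 := if (PySem.Dict.ofList l).contains "buildingCode" then
        if d.contains ((PySem.Dict.ofList l).getD "buildingCode" "") then d
        else d.insert ((PySem.Dict.ofList l).getD "buildingCode" "") []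
      else d with hd1
    have hd1getD : ∀ k, d1.getD k [] = d.getD k [] := by
      intro k
      rw [hd1]
      split
      · split
        · rfl
        · rename_i hnc
          rw [PySem.Dict.getD_insert]
          split
          · rename_i hk
            rw [hk, PySem.Dict.getD_of_not_contains _ _ (Bool.not_eq_true _ ▸ hnc)]
          · rfl
      · rfl
    have hd1nd : d1.keys.Nodup := by
      rw [hd1]
      split
      · split
        · exact hnd
        · exact PySem.Dict.nodup_keys_insert _ _ _ hnd
      · exact hnd
    set d2 := if (PySem.Dict.ofList l).contains "roomNumber" then
        if (d1.getD ((PySem.Dict.ofList l).getD "buildingCode" "") []).contains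
            ((PySem.Dict.ofList l).getD "roomNumber" "") then d1
        else d1.modify ((PySem.Dict.ofList l).getD "buildingCode" "") []
          (· ++ [(PySem.Dict.ofList l).getD "roomNumber" ""])
      else d1 with hd2
    have hd2nd : d2.keys.Nodup := by
      rw [hd2]
      split
      · split
        · exact hd1nd
        · rw [PySem.Dict.keys_modify]
          exact PySem.Dict.nodup_keys_insert _ _ _ hd1nd
      · exact hd1nd
    have hd2getD : ∀ k r, r ∈ d2.getD k [] ↔ r ∈ d.getD k [] ∨
        ((PySem.Dict.ofList l).contains "roomNumber" = true ∧
          (PySem.Dict.ofList l).getD "buildingCode" "" = k ∧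
          (PySem.Dict.ofList l).getD "roomNumber" "" = r) := by
      intro k r
      rw [hd2]
      by_cases hrn : (PySem.Dict.ofList l).contains "roomNumber" = true
      · rw [if_pos hrn]
        by_cases hdup : (d1.getD ((PySem.Dict.ofList l).getD "buildingCode" "") []).contains
            ((PySem.Dict.ofList l).getD "roomNumber" "") = true
        · rw [if_pos hdup, hd1getD]
          constructor
          · exact Or.inl
          · rintro (h | ⟨-, rfl, rfl⟩)
            · exact h
            · rw [← hd1getD]; exact List.contains_iff_mem.1 hdup
        · rw [if_neg hdup, PySem.Dict.getD_modify]
          split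
          · rename_i hk
            subst hk
            rw [List.mem_append, List.mem_singleton, hd1getD]
            constructor
            · rintro (h | rfl)
              · exact Or.inl h
              · exact Or.inr ⟨hrn, rfl, rfl⟩
            · rintro (h | ⟨-, -, rfl⟩)
              · exact Or.inl h
              · exact Or.inr rfl
          · rename_i hk
            rw [hd1getD]
            constructor
            · exact Or.inl
            · rintro (h | ⟨-, rfl, -⟩)
              · exact h
              · exact absurd rfl hk
      · rw [if_neg hrn, hd1getD]
        constructor
        · exact Or.inl
        · rintro (h | ⟨h, -⟩)
          · exact h
          · exact absurd h hrn
    obtain ⟨ihnd, ihm⟩ := ih h1' d2 hd2nd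
    constructor
    · simpa only [List.foldl_cons] using ihnd
    · intro k r
      simp only [List.foldl_cons]
      rw [ihm k r, hd2getD, List.exists_mem_cons_iff]
      tauto

lemma mem_acr (biglist : List (List (String × String)))
    (h1 : ∀ l ∈ biglist, (PySem.Dict.ofList l).contains "roomNumber" = true →
      (PySem.Dict.ofList l).contains "buildingCode" = true) (y : String) :
    y ∈ all_considered_rooms biglist ↔
      ∃ l ∈ biglist, (PySem.Dict.ofList l).contains "roomNumber" = true ∧ y = pvLabel l := by
  unfold all_considered_rooms
  obtain ⟨hnd, hm⟩ := acr_fold_inv biglist h1 PySem.Dict.empty (by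
    show (PySem.Dict.empty : PySem.Dict String (List String)).keys.Nodup
    simp [PySem.Dict.keys_empty])
  rw [mem_acr_flatten _ hnd]
  constructor
  · rintro ⟨k, r, hr, hy⟩
    rw [hm] at hr
    rcases hr with h | ⟨l, hl, hrn, hk, hrv⟩
    · simp [PySem.Dict.getD_empty] at h
    · exact ⟨l, hl, hrn, by rw [hy, ← hk, ← hrv]; rfl⟩
  · rintro ⟨l, hl, hrn, hy⟩
    refine ⟨(PySem.Dict.ofList l).getD "buildingCode" "",
      (PySem.Dict.ofList l).getD "roomNumber" "", ?_, hy⟩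
    rw [hm]
    exact Or.inr ⟨l, hl, hrn, rfl, rfl⟩

-- empty_by_day characterization ------------------------------------------

lemma mem_getD_empty (wd : String) (biglist : List (List (String × String)))
    (i : Nat) (hi : i < 25) (y : String) :
    y ∈ (empty_by_day wd biglist).getD (pvStarts.getD i "") [] ↔
      (y ∈ all_considered_rooms biglist ∧
        ((bookings_by_day wd biglist).getD (pvStarts.getD i "") []).contains y = false) := by
  unfold empty_by_day
  suffices h : ∀ (rs : List String) (d : PySem.Dict String (List String)),
      y ∈ (rs.foldl (fun frd r => pvStarts.foldl (fun frd t =>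
          if ((bookings_by_day wd biglist).getD t []).contains r then frd
          else frd.modify t [] (· ++ [r])) frd) d).getD (pvStarts.getD i "") [] ↔
        y ∈ d.getD (pvStarts.getD i "") [] ∨
          (y ∈ rs ∧ ((bookings_by_day wd biglist).getD (pvStarts.getD i "") []).contains y = false) by
    rw [h, pvFreeInit_getD _ (getD_mem_pvStarts i hi)]
    simp
  intro rs
  induction rs with
  | nil => intro d; simp
  | cons r rs ih =>
    intro d
    simp only [List.foldl_cons]
    rw [ih]
    have hinner : ∀ (d : PySem.Dict String (List String)),
        y ∈ (pvStarts.foldl (fun frd t =>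
            if ((bookings_by_day wd biglist).getD t []).contains r then frd
            else frd.modify t [] (· ++ [r])) d).getD (pvStarts.getD i "") [] ↔
          y ∈ d.getD (pvStarts.getD i "") [] ∨
            (y = r ∧ ((bookings_by_day wd biglist).getD (pvStarts.getD i "") []).contains y = false) := by
      intro d
      have hfun : (fun (frd : PySem.Dict String (List String)) (t : String) =>
            if ((bookings_by_day wd biglist).getD t []).contains r then frd
            else frd.modify t [] (· ++ [r]))
          = (fun (frd : PySem.Dict String (List String)) (t : String) =>
            if !((bookings_by_day wd biglist).getD t []).contains r then frd.modify t [] (· ++ [r])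
            else frd) := by
        funext frd t
        by_cases hc : ((bookings_by_day wd biglist).getD t []).contains r = true <;> simp [hc]
      rw [hfun, mem_getD_foldl_modifyApp pvStarts _ (fun t => t) (fun _ => r) d (pvStarts.getD i "") y]
      constructor
      · rintro (h | ⟨t, ht, hP, hkey, rfl⟩)
        · exact Or.inl h
        · refine Or.inr ⟨rfl, ?_⟩
          rw [← hkey]
          simpa using hP
      · rintro (h | ⟨rfl, hc⟩)
        · exact Or.inl h
        · exact Or.inr ⟨pvStarts.getD i "", getD_mem_pvStarts i hi, by simpa using hc, rfl, rfl⟩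
    rw [hinner, List.mem_cons]
    constructor
    · rintro ((h | ⟨rfl, hc⟩) | ⟨hm, hc⟩)
      · exact Or.inl h
      · exact Or.inr ⟨Or.inl rfl, hc⟩
      · exact Or.inr ⟨Or.inr hm, hc⟩
    · rintro (h | ⟨(rfl | hm), hc⟩)
      · exact Or.inl (Or.inl h)
      · exact Or.inl (Or.inr ⟨rfl, hc⟩)
      · exact Or.inr ⟨hm, hc⟩

lemma contains_empty_by_day (wd : String) (biglist : List (List (String × String)))
    (t : String) (ht : t ∈ pvStarts) : (empty_by_day wd biglist).contains t = true := by
  unfold empty_by_day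
  apply contains_foldl_mono
  · intro d r k hk
    apply contains_foldl_mono
    · intro d' t' k' hk'
      split
      · exact hk'
      · rw [PySem.Dict.contains_modify]; simp [hk']
    · exact hk
  · exact pvFreeInit_contains t ht

-- shape of port A's result -----------------------------------------------

lemma room_info_eq_map (room wd : String) (biglist : List (List (String × String))) :
    room_info room wd biglist =
      pvStarts.map (fun t =>
        (t, if ((empty_by_day wd biglist).getD t []).contains room then "free" else "in use")) := by
  unfold room_info
  rw [PySem.List.foldl_congr_mem pvStarts _
    (fun rud t => if ((empty_by_day wd biglist).getD t []).contains room
      then rud.insert t "free" else rud) pvInUseInit ?_]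
  · have hkeys := keys_foldl_insert_if
      (fun t => ((empty_by_day wd biglist).getD t []).contains room) "free" pvStarts pvInUseInit
      (fun t ht => pvInUseInit_contains t ht)
    have hnd : ((pvStarts.foldl (fun d t =>
        if ((empty_by_day wd biglist).getD t []).contains room then d.insert t "free" else d)
        pvInUseInit)).keys.Nodup := by
      rw [hkeys]; exact pvInUseInit_nodup
    rw [PySem.Dict.items_eq_map_keys _ hnd "", hkeys, pvInUseInit_keys]
    apply List.map_congr_left
    intro t ht
    rw [getD_foldl_insert_if]
    by_cases hc : ((empty_by_day wd biglist).getD t []).contains room = true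
    · rw [if_pos ⟨ht, hc⟩, if_pos hc]
    · rw [if_neg (fun h => hc h.2), if_neg hc, pvInUseInit_getD t ht]
  · intro acc t ht
    have : empty_by_time wd t biglist = some ((empty_by_day wd biglist).getD t []) := by
      unfold empty_by_time
      rw [if_pos (contains_empty_by_day wd biglist t ht)]
    rw [this]

-- A's per-dict booking condition vs the real/phantom split ----------------

lemma startScan_zero (dic : PySem.Dict String String) :
    startScan dic 0 =
      match dic.get? "startTime" with
      | some st => if st ∈ pvStarts then pvStarts.idxOf st else 25
      | none => 0 := by
  rw [startScan_eq dic 0 (by omega)]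
  simp only [List.drop_zero, Nat.zero_add]
  cases hst : dic.get? "startTime" with
  | none =>
    rw [if_neg]
    rw [PySem.Dict.contains_eq_isSome_get?, hst]
    simp
  | some st =>
    rw [if_pos (by rw [PySem.Dict.contains_eq_isSome_get?, hst]; rfl)]
    rw [PySem.Dict.getD_eq_get?_getD, hst]
    rfl

lemma books_iff (room wd : String) (l : List (String × String)) (i : Nat) :
    (BooksAt wd l i ∧ pvLabel l = room) ↔
      (pvRealBook room wd l i = true ∨ pvPhantomBook room wd l i = true) := by
  unfold BooksAt pvRealBook pvPhantomBook pvDayRoom eIdx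
  rw [startScan_zero]
  cases het : (PySem.Dict.ofList l).get? "endTime" with
  | none =>
    have hct : (PySem.Dict.ofList l).contains "endTime" = false := by
      rw [PySem.Dict.contains_eq_isSome_get?, het]; rfl
    cases hst : (PySem.Dict.ofList l).get? "startTime" <;> simp [hct]
  | some et =>
    have hct : (PySem.Dict.ofList l).contains "endTime" = true := by
      rw [PySem.Dict.contains_eq_isSome_get?, het]; rfl
    have hgd : (PySem.Dict.ofList l).getD "endTime" "" = et := by
      rw [PySem.Dict.getD_eq_get?_getD, het]; rfl
    rw [hgd, hct]
    cases hst : (PySem.Dict.ofList l).get? "startTime" with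
    | none =>
      dsimp only
      simp only [Bool.and_eq_true, beq_iff_eq, decide_eq_true_eq,
        true_and, Bool.false_eq_true, or_false, false_or, and_false, Nat.zero_le,
        List.contains_iff_mem]
      exact ⟨fun ⟨⟨a, b, c, d⟩, e⟩ => ⟨⟨⟨a, b⟩, e⟩, c, d⟩,
        fun ⟨⟨⟨a, b⟩, e⟩, c, d⟩ => ⟨⟨a, b, c, d⟩, e⟩⟩
    | some st =>
      dsimp only
      by_cases hsm : st ∈ pvStarts
      · rw [if_pos hsm]
        simp only [Bool.and_eq_true, beq_iff_eq, decide_eq_true_eq,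
          true_and, Bool.false_eq_true, or_false, false_or, and_false,
          List.contains_iff_mem]
        exact ⟨fun ⟨⟨a, b, c, d, e⟩, f⟩ => ⟨⟨⟨a, b⟩, f⟩, ⟨hsm, c⟩, d, e⟩,
          fun ⟨⟨⟨a, b⟩, f⟩, ⟨_, c⟩, d, e⟩ => ⟨⟨a, b, c, d, e⟩, f⟩⟩
      · rw [if_neg hsm]
        simp only [Bool.and_eq_true, beq_iff_eq, decide_eq_true_eq,
          true_and, Bool.false_eq_true, or_false, false_or, and_false,
          List.contains_iff_mem]
        constructor
        · rintro ⟨⟨-, -, hmem, hle, hlt⟩, -⟩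
          have := mem_pvEnds_idx_lt hmem
          omega
        · rintro ⟨-, ⟨hs, -⟩, -⟩
          exact absurd hs hsm

-- port B's busy array ------------------------------------------------------

-- definitionally the step function of room_info_alt's busy fold
def busyStep (room two_letter_weekday : String) (busy : List Bool) (l : List (String × String)) : List Bool :=
  let d := PySem.Dict.ofList l
  if d.contains "buildingCode" && PySem.Str.isIn two_letter_weekday (d.getD "days" "") &&
      (d.getD "buildingCode" "" ++ " " ++ d.getD "roomNumber" "" == room) &&
      (d.get? "startTime").any (fun st => pvStarts.contains st) &&
      (d.get? "endTime").any (fun et => pvEnds.contains et) then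
    (List.range' (pvStarts.idxOf (d.getD "startTime" ""))
        (pvEnds.idxOf (d.getD "endTime" "") - pvStarts.idxOf (d.getD "startTime" ""))).foldl
      (fun busy i => busy.set i true) busy
  else busy

lemma room_info_alt_eq (room wd : String) (biglist : List (List (String × String))) :
    room_info_alt room wd biglist =
      pvStarts.zipIdx.map (fun p =>
        (p.1,
          if (biglist.any (fun l =>
                let d := PySem.Dict.ofList l
                d.contains "buildingCode" && d.contains "roomNumber" &&
                  (d.getD "buildingCode" "" ++ " " ++ d.getD "roomNumber" "" == room))) &&
              !((biglist.foldl (busyStep room wd) (List.replicate 25 false)).getD p.2 false)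
          then "free" else "in use")) := rfl

lemma busyStep_length (room two_letter_weekday : String) (busy : List Bool)
    (l : List (String × String)) :
    (busyStep room two_letter_weekday busy l).length = busy.length := by
  simp only [busyStep]
  split
  · rw [length_foldl_set]
  · rfl

lemma busyStep_guard_of_real (room two_letter_weekday : String) (l : List (String × String))
    (i : Nat) (h : pvRealBook room two_letter_weekday l i = true) :
    ∃ st et, (PySem.Dict.ofList l).get? "startTime" = some st ∧
      (PySem.Dict.ofList l).get? "endTime" = some et ∧
      pvStarts.contains st = true ∧ pvEnds.contains et = true ∧
      ((PySem.Dict.ofList l).contains "buildingCode" &&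
        PySem.Str.isIn two_letter_weekday ((PySem.Dict.ofList l).getD "days" "") &&
        ((PySem.Dict.ofList l).getD "buildingCode" "" ++ " " ++
          (PySem.Dict.ofList l).getD "roomNumber" "" == room)) = true ∧
      pvStarts.idxOf st ≤ i ∧ i < pvEnds.idxOf et := by
  unfold pvRealBook at h
  rw [Bool.and_eq_true] at h
  obtain ⟨hday, hm⟩ := h
  unfold pvDayRoom pvLabel at hday
  revert hm
  cases hst : (PySem.Dict.ofList l).get? "startTime" with
  | none =>
    cases het : (PySem.Dict.ofList l).get? "endTime" <;>
      · intro hm; simp at hm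
  | some st =>
    cases het : (PySem.Dict.ofList l).get? "endTime" with
    | none => intro hm; simp at hm
    | some et =>
      intro hm
      simp only [Bool.and_eq_true, decide_eq_true_eq] at hm
      obtain ⟨⟨hs, he⟩, hle, hlt⟩ := hm
      exact ⟨st, et, rfl, rfl, hs, he, hday, hle, hlt⟩

lemma busyStep_spec (room two_letter_weekday : String) (l : List (String × String))
    (busy : List Bool) (hlen : busy.length = 25) (i : Nat) (hi : i < 25) :
    ((busyStep room two_letter_weekday busy l).getD i false = true ↔
      busy.getD i false = true ∨ pvRealBook room two_letter_weekday l i = true) := by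
  simp only [busyStep]
  split
  · rename_i hg
    simp only [Bool.and_eq_true, beq_iff_eq, Option.any_eq_true] at hg
    obtain ⟨⟨⟨⟨hbc, hdy⟩, hlab⟩, st, hst, hstm⟩, et, het, hetm⟩ := hg
    have hgds : (PySem.Dict.ofList l).getD "startTime" "" = st := by
      rw [PySem.Dict.getD_eq_get?_getD, hst]; rfl
    have hgde : (PySem.Dict.ofList l).getD "endTime" "" = et := by
      rw [PySem.Dict.getD_eq_get?_getD, het]; rfl
    rw [getD_foldl_set _ _ _ (by omega), List.mem_range'_1]
    have hreal : pvRealBook room two_letter_weekday l i = true ↔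
        (pvStarts.idxOf st ≤ i ∧ i < pvEnds.idxOf et) := by
      unfold pvRealBook pvDayRoom pvLabel
      rw [hst, het]
      simp only [Bool.and_eq_true, beq_iff_eq, decide_eq_true_eq]
      constructor
      · rintro ⟨-, -, h⟩
        exact h
      · intro h
        exact ⟨⟨⟨hbc, hdy⟩, hlab⟩, ⟨hstm, hetm⟩, h⟩
    rw [hreal, hgds, hgde]
    constructor
    · rintro (h | h)
      · exact Or.inl h
      · exact Or.inr ⟨by omega, by omega⟩
    · rintro (h | h)
      · exact Or.inl h
      · exact Or.inr ⟨by omega, by omega⟩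
  · rename_i hg
    constructor
    · exact Or.inl
    · rintro (h | h)
      · exact h
      · exfalso
        apply hg
        obtain ⟨st, et, hst, het, hs, he, hday, -, -⟩ :=
          busyStep_guard_of_real room two_letter_weekday l i h
        simp only [Bool.and_eq_true, Option.any_eq_true] at hday ⊢
        exact ⟨⟨hday, _, hst, hs⟩, _, het, he⟩

lemma busy_spec (room two_letter_weekday : String) (biglist : List (List (String × String)))
    (i : Nat) (hi : i < 25) :
    ((biglist.foldl (busyStep room two_letter_weekday) (List.replicate 25 false)).getD i false = true) ↔
      ∃ l ∈ biglist, pvRealBook room two_letter_weekday l i = true := by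
  suffices h : ∀ (bs : List (List (String × String))) (busy : List Bool), busy.length = 25 →
      ((bs.foldl (busyStep room two_letter_weekday) busy).getD i false = true ↔
        busy.getD i false = true ∨ ∃ l ∈ bs, pvRealBook room two_letter_weekday l i = true) by
    rw [h biglist (List.replicate 25 false) (by simp)]
    have h0 : (List.replicate 25 false).getD i false = false := by
      rw [List.getD, List.getElem?_replicate]
      split <;> rfl
    rw [h0]
    simp
  intro bs
  induction bs with
  | nil => intro busy hlen; simp
  | cons l ls ih =>
    intro busy hlen
    simp only [List.foldl_cons]
    rw [ih _ (by rw [busyStep_length, hlen]), List.exists_mem_cons_iff,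
      busyStep_spec room two_letter_weekday l busy hlen i hi]
    tauto

-- considered flags agree ----------------------------------------------------

lemma consideredAlt_eq (room : String) (biglist : List (List (String × String))) :
    (biglist.any (fun l =>
      let d := PySem.Dict.ofList l
      d.contains "buildingCode" && d.contains "roomNumber" &&
        (d.getD "buildingCode" "" ++ " " ++ d.getD "roomNumber" "" == room)))
      = pvConsidered room biglist := by
  unfold pvConsidered
  have h : ∀ l : List (String × String),
      ((PySem.Dict.ofList l).contains "buildingCode" && (PySem.Dict.ofList l).contains "roomNumber" &&
        ((PySem.Dict.ofList l).getD "buildingCode" "" ++ " " ++ (PySem.Dict.ofList l).getD "roomNumber" "" == room))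
      = ((PySem.Dict.ofList l).contains "roomNumber" && (PySem.Dict.ofList l).contains "buildingCode" &&
        (pvLabel l == room)) := by
    intro l
    unfold pvLabel
    cases (PySem.Dict.ofList l).contains "buildingCode" <;>
      cases (PySem.Dict.ofList l).contains "roomNumber" <;> simp
  simp only [h]

lemma mem_acr_iff_considered (room : String) (biglist : List (List (String × String)))
    (h1 : ∀ l ∈ biglist, (PySem.Dict.ofList l).contains "roomNumber" = true →
      (PySem.Dict.ofList l).contains "buildingCode" = true) :
    room ∈ all_considered_rooms biglist ↔ pvConsidered room biglist = true := by
  rw [mem_acr biglist h1 room]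
  unfold pvConsidered
  rw [List.any_eq_true]
  constructor
  · rintro ⟨l, hl, hrn, hlab⟩
    exact ⟨l, hl, by
      simp only [Bool.and_eq_true, beq_iff_eq]
      exact ⟨⟨hrn, h1 l hl hrn⟩, hlab.symm⟩⟩
  · rintro ⟨l, hl, h⟩
    simp only [Bool.and_eq_true, beq_iff_eq] at h
    exact ⟨l, hl, h.1.1, h.2.symm⟩

-- A's slot-i status, in terms of considered / real / phantom ----------------

lemma room_info_snd (room wd : String) (biglist : List (List (String × String)))
    (h1 : ∀ l ∈ biglist, (PySem.Dict.ofList l).contains "roomNumber" = true →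
      (PySem.Dict.ofList l).contains "buildingCode" = true)
    (i : Nat) (hi : i < 25) :
    (((empty_by_day wd biglist).getD (pvStarts.getD i "") []).contains room = true) ↔
      (pvConsidered room biglist = true ∧
        ¬ (∃ l ∈ biglist, (pvRealBook room wd l i = true ∨ pvPhantomBook room wd l i = true))) := by
  rw [List.contains_iff_mem, mem_getD_empty wd biglist i hi]
  have hbook : ∀ (X : List String), (X.contains room = false) ↔ ¬ room ∈ X := by
    intro X
    rw [← List.contains_iff_mem]
    cases hX : X.contains room <;> simp
  rw [hbook, mem_getD_bookings wd biglist i hi, mem_acr_iff_considered room biglist h1]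
  constructor
  · rintro ⟨hc, hnb⟩
    refine ⟨hc, ?_⟩
    rintro ⟨l, hl, hrl⟩
    exact hnb ⟨l, hl, by
      have := (books_iff room wd l i).2 hrl
      exact ⟨this.1, this.2.symm⟩⟩
  · rintro ⟨hc, hnb⟩
    refine ⟨hc, ?_⟩
    rintro ⟨l, hl, hb, hlab⟩
    exact hnb ⟨l, hl, (books_iff room wd l i).1 ⟨hb, hlab.symm⟩⟩

-- key presence in Dict.ofList is key presence in the raw pair list
lemma get?_update_none_iff {v : Type} (ps : List (String × v)) :
    ∀ (d : PySem.Dict String v) (k : String),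
      (d.update ps).get? k = none ↔ d.get? k = none ∧ ∀ kv ∈ ps, kv.1 ≠ k := by
  induction ps with
  | nil => intro d k; simp [PySem.Dict.update]
  | cons p ps ih =>
    intro d k
    have hstep : d.update (p :: ps) = (d.insert p.1 p.2).update ps := by
      simp [PySem.Dict.update]
    rw [hstep, ih]
    rw [PySem.Dict.get?_insert]
    constructor
    · rintro ⟨h1, h2⟩
      by_cases hk : k = p.1
      · rw [if_pos hk] at h1; cases h1
      · rw [if_neg hk] at h1
        refine ⟨h1, ?_⟩
        intro kv hkv
        rcases List.mem_cons.1 hkv with rfl | hm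
        · exact fun h => hk h.symm
        · exact h2 kv hm
    · rintro ⟨h1, h2⟩
      have hk : k ≠ p.1 := fun h => h2 p List.mem_cons_self h.symm
      rw [if_neg hk]
      exact ⟨h1, fun kv hkv => h2 kv (List.mem_cons_of_mem _ hkv)⟩

lemma pvF_none_iff (l : List (String × String)) (k : String) :
    pvF l k = none ↔ ∀ kv ∈ l, kv.1 ≠ k := by
  unfold pvF
  show (PySem.Dict.empty.update l).get? k = none ↔ _
  rw [get?_update_none_iff]
  simp [PySem.Dict.get?_empty]

lemma pvF_isSome_iff (l : List (String × String)) (k : String) :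
    (pvF l k).isSome = true ↔ ∃ kv ∈ l, kv.1 = k := by
  constructor
  · intro h
    by_contra hn
    push_neg at hn
    have : pvF l k = none := (pvF_none_iff l k).2 fun kv hkv => hn kv hkv
    rw [this] at h
    cases h
  · intro h
    cases hf : pvF l k with
    | some v => rfl
    | none =>
      obtain ⟨kv, hkv, hk⟩ := h
      exact absurd hk ((pvF_none_iff l k).1 hf kv hkv)

-- pvCovers is exactly pvRealBook
lemma covers_iff (room wd : String) (l : List (String × String)) (i : Nat) :
    pvCovers room wd l i = true ↔ pvRealBook room wd l i = true := by
  unfold pvCovers pvF pvRealBook pvDayRoom pvLabel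
  simp only [PySem.Dict.contains_eq_isSome_get?, PySem.Dict.getD_eq_get?_getD]
  cases hst : (PySem.Dict.ofList l).get? "startTime" <;>
    cases het : (PySem.Dict.ofList l).get? "endTime"
  · simp
  · simp
  · simp
  · rename_i st et
    simp only [Bool.and_eq_true, beq_iff_eq, decide_eq_true_eq, List.contains_iff_mem]
    constructor
    · rintro ⟨⟨⟨hbc, hdy⟩, hlab⟩, hem, hle, hlt⟩
      have hse : pvEnds.idxOf et < 25 := mem_pvEnds_idx_lt hem
      have hsm : st ∈ pvStarts := by
        have : pvStarts.idxOf st < pvStarts.length := by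
          have : pvStarts.length = 25 := rfl
          omega
        exact List.idxOf_lt_length_iff.1 this
      exact ⟨⟨⟨hbc, hdy⟩, hlab⟩, ⟨hsm, hem⟩, hle, hlt⟩
    · rintro ⟨⟨⟨hbc, hdy⟩, hlab⟩, ⟨hsm, hem⟩, hle, hlt⟩
      exact ⟨⟨⟨hbc, hdy⟩, hlab⟩, hem, hle, hlt⟩

-- a phantom booking record whose slot i is covered by no complete booking puts the input inside D_
lemma phantom_D (room wd : String) (biglist : List (List (String × String)))
    (l : List (String × String)) (hl : l ∈ biglist) (i : Nat)
    (hp : pvPhantomBook room wd l i = true)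
    (hcov : ¬ ∃ l2 ∈ biglist, pvCovers room wd l2 i = true) : D_room_info room wd biglist := by
  unfold pvPhantomBook pvDayRoom pvLabel at hp
  rw [Bool.and_eq_true] at hp
  obtain ⟨hday, hm⟩ := hp
  simp only [Bool.and_eq_true, beq_iff_eq, PySem.Dict.contains_eq_isSome_get?,
    PySem.Dict.getD_eq_get?_getD] at hday
  obtain ⟨⟨hbc, hdy⟩, hlab⟩ := hday
  revert hm
  cases hst : (PySem.Dict.ofList l).get? "startTime" with
  | some st =>
    cases het : (PySem.Dict.ofList l).get? "endTime" <;>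
      · intro hm; exact Bool.noConfusion hm
  | none =>
    cases het : (PySem.Dict.ofList l).get? "endTime" with
    | none => intro hm; exact Bool.noConfusion hm
    | some et =>
      intro hm
      simp only [Bool.and_eq_true, decide_eq_true_eq, List.contains_iff_mem] at hm
      obtain ⟨hem, hlt⟩ := hm
      unfold D_room_info pvF
      have h1 : ((PySem.Dict.ofList l).get? "endTime").getD "" = et := by rw [het]; rfl
      exact ⟨l, hl, (pvF_isSome_iff l "buildingCode").1 hbc, hst,
        hdy, by rw [h1]; exact hem, hlab, i, by rw [h1]; exact List.mem_range.2 hlt, hcov⟩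

-- ===== VERDICT =====
theorem room_info_spec : Claim_unchanged_room_info := by
  intro room wd biglist _ hpre
  have h1 : ∀ l ∈ biglist, (PySem.Dict.ofList l).contains "roomNumber" = true →
      (PySem.Dict.ofList l).contains "buildingCode" = true := fun l hl h => (hpre l hl).1 h
  unfold Spec_room_info
  intro hnd
  rw [room_info_eq_map, room_info_alt_eq]
  apply List.ext_getElem
  · simp
  · intro i hi1 hi2
    have hlen : i < pvStarts.length := by
      rw [List.length_map] at hi1; exact hi1
    have hi : i < 25 := hlen
    have hg : pvStarts.getD i "" = pvStarts[i]'hlen := by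
      rw [List.getD, List.getElem?_eq_getElem hlen]
      rfl
    rw [List.getElem_map, List.getElem_map, List.getElem_zipIdx]
    dsimp only
    simp only [Nat.zero_add]
    refine Prod.ext rfl ?_
    dsimp only
    have hA := room_info_snd room wd biglist h1 i hi
    rw [hg] at hA
    have hB := busy_spec room wd biglist i hi
    rw [consideredAlt_eq]
    have hcond : (((empty_by_day wd biglist).getD (pvStarts[i]'hlen) []).contains room)
        = (pvConsidered room biglist &&
            !((biglist.foldl (busyStep room wd) (List.replicate 25 false)).getD i false)) := by
      apply Bool.eq_iff_iff.2
      simp only [Bool.and_eq_true, Bool.not_eq_true']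
      rw [hA]
      constructor
      · rintro ⟨hc, hn⟩
        refine ⟨hc, ?_⟩
        cases hF : ((biglist.foldl (busyStep room wd) (List.replicate 25 false)).getD i false) with
        | false => rfl
        | true =>
          obtain ⟨l, hl, hr⟩ := hB.1 hF
          exact absurd ⟨l, hl, Or.inl hr⟩ hn
      · rintro ⟨hc, hF⟩
        refine ⟨hc, ?_⟩
        rintro ⟨l, hl, (hr | hp)⟩
        · rw [hB.2 ⟨l, hl, hr⟩] at hF
          cases hF
        · -- a phantom booking at an uncovered slot would place the input inside D_
          by_cases hcov : ∃ l2 ∈ biglist, pvCovers room wd l2 i = true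
          · obtain ⟨l2, hl2, hcv⟩ := hcov
            rw [hB.2 ⟨l2, hl2, (covers_iff room wd l2 i).1 hcv⟩] at hF
            cases hF
          · exact absurd (phantom_D room wd biglist l hl i hp hcov) hnd
    rw [hcond]

set_option maxRecDepth 10000 in
theorem room_info_changed : Claim_changed_room_info := by unfold Claim_changed_room_info; decide

theorem room_info_tight : Claim_exact_room_info := by
  intro room wd biglist _ hpre hd
  have h1 : ∀ l ∈ biglist, (PySem.Dict.ofList l).contains "roomNumber" = true →
      (PySem.Dict.ofList l).contains "buildingCode" = true := fun l hl h => (hpre l hl).1 h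
  unfold D_room_info pvF at hd
  obtain ⟨l, hl, hbcRaw, hst, hdy, hem, hlab, i, hir, hcov⟩ := hd
  have hbc : ((PySem.Dict.ofList l).get? "buildingCode").isSome = true :=
    (pvF_isSome_iff l "buildingCode").2 hbcRaw
  -- the endTime key is present (its getD-value is a real end slot)
  have hetS : ((PySem.Dict.ofList l).get? "endTime").isSome = true := by
    cases het : (PySem.Dict.ofList l).get? "endTime" with
    | none =>
      rw [het] at hem
      exact absurd hem (by decide)
    | some et => rfl
  have hgdE : (PySem.Dict.ofList l).getD "endTime" "" = ((PySem.Dict.ofList l).get? "endTime").getD "" :=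
    PySem.Dict.getD_eq_get?_getD _ _ _
  rw [← hgdE] at hem hir
  have hgdB : ((PySem.Dict.ofList l).get? "buildingCode").getD "" = (PySem.Dict.ofList l).getD "buildingCode" "" :=
    (PySem.Dict.getD_eq_get?_getD _ _ _).symm
  have hgdR : ((PySem.Dict.ofList l).get? "roomNumber").getD "" = (PySem.Dict.ofList l).getD "roomNumber" "" :=
    (PySem.Dict.getD_eq_get?_getD _ _ _).symm
  have hgdD : ((PySem.Dict.ofList l).get? "days").getD "" = (PySem.Dict.ofList l).getD "days" "" :=
    (PySem.Dict.getD_eq_get?_getD _ _ _).symm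
  rw [hgdB, hgdR] at hlab
  rw [hgdD] at hdy
  have hlt : i < pvEnds.idxOf ((PySem.Dict.ofList l).getD "endTime" "") := List.mem_range.1 hir
  have hi : i < 25 := lt_trans hlt (mem_pvEnds_idx_lt hem)
  have hctbc : (PySem.Dict.ofList l).contains "buildingCode" = true := by
    rw [PySem.Dict.contains_eq_isSome_get?]; exact hbc
  have hcte : (PySem.Dict.ofList l).contains "endTime" = true := by
    rw [PySem.Dict.contains_eq_isSome_get?]; exact hetS
  have hps : pvPreStart l = 0 := by unfold pvPreStart; rw [hst]
  have hrn : (PySem.Dict.ofList l).contains "roomNumber" = true :=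
    (hpre l hl).2.2 hctbc hdy hcte hem (by omega)
  -- the record is a phantom booking of slot i
  have hp : pvPhantomBook room wd l i = true := by
    unfold pvPhantomBook pvDayRoom pvLabel
    rw [hst]
    obtain ⟨et, het⟩ := Option.isSome_iff_exists.1 hetS
    rw [het]
    have hgde : (PySem.Dict.ofList l).getD "endTime" "" = et := by
      rw [PySem.Dict.getD_eq_get?_getD, het]; rfl
    rw [hgde] at hem hlt
    simp only [Bool.and_eq_true, beq_iff_eq, decide_eq_true_eq, List.contains_iff_mem]
    exact ⟨⟨⟨hctbc, hdy⟩, hlab⟩, hem, hlt⟩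
  -- the room is considered
  have hc : pvConsidered room biglist = true := by
    unfold pvConsidered
    refine List.any_eq_true.2 ⟨l, hl, ?_⟩
    simp only [Bool.and_eq_true, beq_iff_eq]
    exact ⟨⟨hrn, hctbc⟩, by unfold pvLabel; exact hlab⟩
  intro heq
  have hlen : i < pvStarts.length := hi
  have hg : pvStarts.getD i "" = pvStarts[i]'hlen := by
    rw [List.getD, List.getElem?_eq_getElem hlen]
    rfl
  -- A's entry at slot i is "in use"
  have hA : (room_info room wd biglist)[i]? = some (pvStarts[i]'hlen, "in use") := by
    have hAi := room_info_snd room wd biglist h1 i hi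
    have hnotfree : (((empty_by_day wd biglist).getD (pvStarts.getD i "") []).contains room) = false := by
      rw [Bool.eq_false_iff]
      intro hfree
      obtain ⟨-, hn⟩ := hAi.1 hfree
      exact hn ⟨l, hl, Or.inr hp⟩
    rw [hg] at hnotfree
    rw [room_info_eq_map, List.getElem?_map, List.getElem?_eq_getElem hlen]
    simp only [Option.map_some]
    rw [hnotfree]
    rfl
  -- B's entry at slot i is "free"
  have hB : (room_info_alt room wd biglist)[i]? = some (pvStarts[i]'hlen, "free") := by
    rw [room_info_alt_eq, List.getElem?_map]
    have hzip : pvStarts.zipIdx[i]? = some (pvStarts[i]'hlen, i) := by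
      rw [List.getElem?_zipIdx, List.getElem?_eq_getElem hlen]
      simp
    rw [hzip]
    simp only [Option.map_some]
    have hBi := busy_spec room wd biglist i hi
    have hF : ((biglist.foldl (busyStep room wd) (List.replicate 25 false)).getD i false) = false := by
      rw [Bool.eq_false_iff]
      intro hT
      obtain ⟨l2, hl2, hr⟩ := hBi.1 hT
      exact hcov ⟨l2, hl2, (covers_iff room wd l2 i).2 hr⟩
    rw [consideredAlt_eq, hc, hF]
    rfl
  rw [heq, hB] at hA
  simp at hA
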